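-- pv_equiv track=rewrite | github.com/lsh3384/algorithm | problems/kakao/2018_1_비밀지도.py | solution
-- ===== SOURCE A (Python) =====
-- def solution(n, arr1, arr2):
--     bin_arr1 = []
--
--     for num in arr1:
--         tmp_bin = ''
--         for i in range(n - 1, -1, -1):
--             binary = num // 2 ** (i)
--             tmp_bin += str(binary)
--             num = num % (2 ** (i))
--         bin_arr1.append(tmp_bin)
--
--     bin_arr2 = []
--     for num in arr2:
--         tmp_bin = ''
--         for i in range(n - 1, -1, -1):
--             binary = num // 2 ** (i)
--             tmp_bin += str(binary)
--             num = num % (2 ** (i))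
--         bin_arr2.append(tmp_bin)
--
--     answer = []
--     for a, b in zip(bin_arr1, bin_arr2):
--         tmp_bin = ''
--         for i, j in zip(a, b):
--             if int(i) or int(j):
--                 tmp_bin += '#'
--             else:
--                 tmp_bin += ' '
--         answer.append(tmp_bin)
--
--     return answer
-- ===== SOURCE B (Python) =====
-- def solution(n, arr1, arr2):
--     return [''.join('#' if (a | b) >> i & 1 else ' ' for i in range(n - 1, -1, -1))
--             for a, b in zip(arr1, arr2)]
-- ===== Notes on version B (the rewrite author's own statement) =====
-- stated objective: simpler
-- what changed: B ORs each pair as integers and renders each row in one pass by testing bits of a|b with shifts, replacing A's two manual repeated-division binary-string builders plus a digit-wise string-comparison loop.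
-- outside the precondition, e.g. on solution(2, [5], [0]): A returns ['##'], B returns [' #']
import Mathlib
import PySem

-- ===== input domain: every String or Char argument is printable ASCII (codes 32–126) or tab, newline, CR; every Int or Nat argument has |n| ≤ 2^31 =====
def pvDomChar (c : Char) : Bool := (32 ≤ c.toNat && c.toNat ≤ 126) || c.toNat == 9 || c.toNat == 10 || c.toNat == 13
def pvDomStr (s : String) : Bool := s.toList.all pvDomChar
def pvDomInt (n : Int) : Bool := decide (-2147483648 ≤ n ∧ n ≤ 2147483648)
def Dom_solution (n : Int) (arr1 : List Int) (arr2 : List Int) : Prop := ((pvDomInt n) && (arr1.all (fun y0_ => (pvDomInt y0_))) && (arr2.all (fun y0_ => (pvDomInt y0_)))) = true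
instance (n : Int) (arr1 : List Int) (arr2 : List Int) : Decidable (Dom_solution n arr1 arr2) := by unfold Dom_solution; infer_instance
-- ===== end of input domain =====

-- B ORs each pair as integers and renders each row in one pass by testing bits of a|b with
-- shifts, instead of A's two manual repeated-division binary-string builders plus a digit-wise
-- string-comparison loop (objective: simpler; same asymptotic cost).

-- ===== PORT A =====
-- inner loop over range(n-1, -1, -1); i ≥ 0 on every element of that range, so 2 ** i = 2 ^ i.toNat exactly
def solnRow (n : Int) (num0 : Int) : String :=
  ((PySem.List.pyRange (n - 1) (-1) (-1)).foldl
    (fun (st : String × Int) i =>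
      (st.1 ++ PySem.Int.toStr (PySem.Int.floordiv st.2 (2 ^ i.toNat)),
       PySem.Int.mod st.2 (2 ^ i.toNat)))
    ("", num0)).1

-- int(c) → (PySem.Int.ofStr? …).getD 0: exact wherever Python's int(c) succeeds; where int(c)
-- raises ValueError (a digit char never produced under Pre_solution) the input is outside Pre_solution
def solution (n : Int) (arr1 : List Int) (arr2 : List Int) : List String :=
  let bin_arr1 := arr1.map (solnRow n)
  let bin_arr2 := arr2.map (solnRow n)
  (bin_arr1.zip bin_arr2).map (fun ab =>
    (ab.1.toList.zip ab.2.toList).foldl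
      (fun (t : String) p =>
        if (PySem.Int.ofStr? (String.ofList [p.1])).getD 0 ≠ 0 ∨ (PySem.Int.ofStr? (String.ofList [p.2])).getD 0 ≠ 0
        then t ++ "#" else t ++ " ") "")

-- ===== PORT B =====
-- (a|b) >> i & 1: i ≥ 0 on every element of range(n-1, -1, -1), so >> i = >>> i.toNat exactly;
-- Python's >> and & on negative ints are two's-complement/floor, as Lean's Int.shiftRight/Int.land
def solution_alt (n : Int) (arr1 : List Int) (arr2 : List Int) : List String :=
  (arr1.zip arr2).map (fun p =>
    String.ofList ((PySem.List.pyRange (n - 1) (-1) (-1)).map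
      (fun i => if PySem.Int.band ((PySem.Int.bor p.1 p.2) >>> i.toNat) 1 ≠ 0 then '#' else ' ')))

-- ===== PRECONDITION & SPEC =====
-- Pre_ restricts to the problem's natural domain (1 ≤ n, every compared entry an n-bit nonnegative
-- number) plus the trivial cases where nothing is rendered (either list empty, or n ≤ 0: every row
-- is empty and both return the same list of empty strings); outside it A either raises ValueError
-- (negative compared entries yield a '-' char fed to int()) or returns garbled rows built from
-- multi-digit quotient tokens (compared entries ≥ 2^n).
def Pre_solution (n : Int) (arr1 : List Int) (arr2 : List Int) : Prop :=
  arr1.zip arr2 = [] ∨ n ≤ 0 ∨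
    (1 ≤ n ∧ ∀ p ∈ arr1.zip arr2, 0 ≤ p.1 ∧ p.1 < 2 ^ n.toNat ∧ 0 ≤ p.2 ∧ p.2 < 2 ^ n.toNat)
instance (n : Int) (arr1 : List Int) (arr2 : List Int) : Decidable (Pre_solution n arr1 arr2) := by unfold Pre_solution; infer_instance

def pvWitness_solution : Int × List Int × List Int := (3, [5, 2], [7, 0])

def Spec_solution (n : Int) (arr1 : List Int) (arr2 : List Int) (out : List String) : Prop := out = solution_alt n arr1 arr2
instance (n : Int) (arr1 : List Int) (arr2 : List Int) (out : List String) : Decidable (Spec_solution n arr1 arr2 out) := by unfold Spec_solution; infer_instance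

-- ===== CLAIM (what is proved, stated in full; the proofs are below) =====
def Claim_equal_solution : Prop := ∀ (n : Int) (arr1 : List Int) (arr2 : List Int), Dom_solution n arr1 arr2 → Pre_solution n arr1 arr2 → Spec_solution n arr1 arr2 (solution n arr1 arr2)

-- ===== LEMMAS AND PROOFS =====

-- big-endian k-bit string of m
def bitsBE (k m : Nat) : List Char :=
  (List.range k).reverse.map (fun j => if m.testBit j then '1' else '0')

lemma floordiv_pow (m k : Nat) : PySem.Int.floordiv (m:Int) ((2:Int)^k) = ((m / 2^k : Nat) : Int) := by
  have h : (0:Int) ≤ 2^k := by positivity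
  simp [PySem.Int.floordiv, Int.fdiv_eq_ediv, h, Int.natCast_div]

lemma mod_pow (m k : Nat) : PySem.Int.mod (m:Int) ((2:Int)^k) = ((m % 2^k : Nat) : Int) := by
  have h : (0:Int) ≤ 2^k := by positivity
  simp [PySem.Int.mod, Int.fmod_eq_emod, h, Int.natCast_mod]

lemma bitsBE_succ (k m : Nat) :
    bitsBE (k+1) m = (if m.testBit k then '1' else '0') :: bitsBE k (m % 2 ^ k) := by
  unfold bitsBE
  simp only [List.range_succ, List.reverse_append, List.reverse_singleton, List.singleton_append,
    List.map_cons]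
  congr 1
  apply List.map_congr_left
  intro j hj
  have hjk : j < k := by simpa using hj
  simp [Nat.testBit_mod_two_pow, hjk]

lemma rowA (k : Nat) : ∀ (m : Nat) (s : String), m < 2 ^ k →
    ((PySem.List.pyRange ((k:Int) - 1) (-1) (-1)).foldl
      (fun (st : String × Int) i =>
        (st.1 ++ PySem.Int.toStr (PySem.Int.floordiv st.2 (2 ^ i.toNat)),
         PySem.Int.mod st.2 (2 ^ i.toNat)))
      (s, (m : Int))) = (s ++ String.ofList (bitsBE k m), ((m % 2 ^ 0 : Nat) : Int)) := by
  induction k with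
  | zero =>
      intro m s h
      have hm : m = 0 := by omega
      rw [PySem.List.pyRange_neg_one_eq_nil (by omega)]
      subst hm
      simp [bitsBE]
  | succ k ih =>
      intro m s h
      rw [PySem.List.pyRange_neg_one_cons (by push_cast; omega)]
      have e2 : ((k+1:Nat):Int) - 1 - 1 = (k:Int) - 1 := by push_cast; ring
      rw [e2, List.foldl_cons,
        show ((((k+1:Nat):Int) - 1)).toNat = k from by omega,
        floordiv_pow, mod_pow]
      have hrec := ih (m % 2^k) (s ++ PySem.Int.toStr ((m / 2^k : Nat) : Int))
        (Nat.mod_lt _ (Nat.two_pow_pos k))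
      rw [hrec]
      have hd2 : m / 2 ^ k < 2 :=
        Nat.div_lt_of_lt_mul (show m < 2^k*2 by
          have e : 2^(k+1) = 2^k*2 := by ring
          omega)
      have htb : m.testBit k = decide (m / 2^k % 2 = 1) := Nat.testBit_eq_decide_div_mod_eq
      rw [bitsBE_succ]
      refine Prod.ext ?_ ?_
      · have h01 : m / 2 ^ k = 0 ∨ m / 2 ^ k = 1 := by
          generalize m / 2 ^ k = d at hd2 ⊢; omega
        rcases h01 with h0 | h1
        · rw [h0] at htb ⊢
          simp only [htb]
          norm_num
          rw [show (PySem.Int.toStr 0) = String.ofList ['0'] from by decide,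
            String.append_assoc, ← String.ofList_append]
          rfl
        · rw [h1] at htb ⊢
          simp only [htb]
          norm_num
          rw [show (PySem.Int.toStr 1) = String.ofList ['1'] from by decide,
            String.append_assoc, ← String.ofList_append]
          rfl
      · simp

lemma solnRow_eq (n : Int) (hn : 1 ≤ n) (m : Nat) (h : m < 2 ^ n.toNat) :
    solnRow n (m : Int) = String.ofList (bitsBE n.toNat m) := by
  unfold solnRow
  have hcast : n - 1 = ((n.toNat : Int)) - 1 := by
    rw [Int.toNat_of_nonneg (by omega)]
  rw [hcast, rowA n.toNat m "" h]
  simp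

lemma foldl_hash (C : Char × Char → Prop) [DecidablePred C] :
    ∀ (l : List (Char × Char)) (s : String),
    l.foldl (fun (t : String) p => if C p then t ++ "#" else t ++ " ") s
      = s ++ String.ofList (l.map (fun p => if C p then '#' else ' ')) := by
  intro l
  induction l with
  | nil => intro s; simp
  | cons x xs ih =>
      intro s
      simp only [List.foldl_cons, List.map_cons]
      rw [ih]
      by_cases hx : C x
      · rw [if_pos hx, if_pos hx, String.append_assoc]
        congr 1
        rw [show ("#" : String) = String.ofList ['#'] from by decide, ← String.ofList_append]
        rfl
      · rw [if_neg hx, if_neg hx, String.append_assoc]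
        congr 1
        rw [show (" " : String) = String.ofList [' '] from by decide, ← String.ofList_append]
        rfl

lemma pyRange_countdown (k : Nat) :
    PySem.List.pyRange ((k : Int) - 1) (-1) (-1) = List.map (fun j : Nat => (j : Int)) (List.range k).reverse := by
  induction k with
  | zero => rw [PySem.List.pyRange_neg_one_eq_nil (by omega)]; simp
  | succ k ih =>
      rw [PySem.List.pyRange_neg_one_cons (by push_cast; omega)]
      have e2 : ((k+1:Nat):Int) - 1 - 1 = (k:Int) - 1 := by push_cast; ring
      rw [e2, ih, List.range_succ]
      simp only [List.reverse_append, List.reverse_singleton, List.singleton_append, List.map_cons]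
      congr 1
      push_cast; ring

-- the Python-B bit test on a nonnegative value is Nat.testBit
lemma bit_test (x j : Nat) :
    (PySem.Int.band ((x:Int) >>> j) 1 ≠ 0) ↔ x.testBit j := by
  have e2 : ((x:Int) >>> j) = ((x >>> j : Nat) : Int) := rfl
  rw [e2, show (1:Int) = ((1:Nat):Int) from rfl, PySem.Int.band_natCast]
  rw [Nat.and_one_is_mod, Nat.shiftRight_eq_div_pow, Nat.testBit_eq_decide_div_mod_eq]
  constructor
  · intro h
    have hne : x / 2 ^ j % 2 ≠ 0 := by exact_mod_cast h
    simp only [decide_eq_true_eq]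
    omega
  · intro h
    have h1 := of_decide_eq_true h
    exact_mod_cast (by omega : (x / 2 ^ j % 2 : Nat) ≠ 0)

lemma mapB (k x : Nat) :
    ((List.map (fun j : Nat => (j : Int)) (List.range k).reverse).map
      (fun i => if PySem.Int.band (((x : Nat) : Int) >>> i.toNat) 1 ≠ 0 then '#' else ' '))
    = (List.range k).reverse.map (fun j => if x.testBit j then '#' else ' ') := by
  rw [List.map_map]
  apply List.map_congr_left
  intro j hj
  simp only [Function.comp_apply, Int.toNat_natCast]
  by_cases htx : x.testBit j
  · simp [bit_test, htx]
  · simp [bit_test, htx]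

lemma row_eq (n : Int) (hn : 1 ≤ n) (a b : Nat)
    (ha : a < 2 ^ n.toNat) (hb : b < 2 ^ n.toNat) :
    ((bitsBE n.toNat a).zip (bitsBE n.toNat b)).foldl
      (fun (t : String) p =>
        if (PySem.Int.ofStr? (String.ofList [p.1])).getD 0 ≠ 0 ∨ (PySem.Int.ofStr? (String.ofList [p.2])).getD 0 ≠ 0
        then t ++ "#" else t ++ " ") ""
    = String.ofList ((PySem.List.pyRange (n - 1) (-1) (-1)).map
        (fun i => if PySem.Int.band ((((a ||| b : Nat) : Int)) >>> i.toNat) 1 ≠ 0 then '#' else ' ')) := by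
  unfold bitsBE
  rw [List.zip_map', foldl_hash]
  have hcast : n - 1 = ((n.toNat : Int)) - 1 := by
    rw [Int.toNat_of_nonneg (by omega)]
  rw [hcast, pyRange_countdown, mapB]
  simp only [String.empty_append, List.map_map]
  congr 1
  apply List.map_congr_left
  intro j hj
  simp only [Function.comp_apply, Nat.testBit_or]
  by_cases hta : a.testBit j <;> by_cases htb : b.testBit j <;>
    simp [hta, htb] <;> decide

-- ===== VERDICT (by name: the statement is the Claim_ definition above) =====
theorem solution_spec : Claim_equal_solution := by
  intro n arr1 arr2 _hdom hpre
  unfold Spec_solution solution solution_alt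
  simp only [List.zip_map, List.map_map]
  rcases hpre with hz | hpre'
  · simp [hz]
  rcases hpre' with hn0 | ⟨hn, hb⟩
  · -- n ≤ 0: every row on both sides is the empty string
    apply List.map_congr_left
    intro p hp
    obtain ⟨a, b⟩ := p
    have hnil : PySem.List.pyRange (n - 1) (-1) (-1) = [] :=
      PySem.List.pyRange_neg_one_eq_nil (by omega)
    have hrow : ∀ x : Int, solnRow n x = "" := by
      intro x
      unfold solnRow
      rw [hnil]
      rfl
    simp only [Function.comp_apply, Prod.map_apply, hrow, hnil, List.map_nil]
    rfl
  · apply List.map_congr_left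
    intro p hp
    obtain ⟨a, b⟩ := p
    obtain ⟨ha0, ha1, hb0, hb1⟩ := hb (a, b) hp
    lift a to Nat using ha0 with aN
    lift b to Nat using hb0 with bN
    have haN : aN < 2 ^ n.toNat := by exact_mod_cast ha1
    have hbN : bN < 2 ^ n.toNat := by exact_mod_cast hb1
    simp only [Function.comp_apply, Prod.map_apply]
    rw [solnRow_eq n hn aN haN, solnRow_eq n hn bN hbN]
    simp only [String.toList_ofList]
    rw [show PySem.Int.bor (aN:Int) (bN:Int) = ((aN ||| bN : Nat) : Int) from by
      simp [PySem.Int.bor_natCast]]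
    exact row_eq n hn aN bN haN hbN
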